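-- pv_equiv track=rewrite | github.com/s4mdf0o1/TuxKatana | lib/midi_bytes.py | int_to_hexstring
-- ===== SOURCE A (Python) =====
-- def int_to_hexstring(value: int, length: int) -> str:
--     if not isinstance(value, int):
--         raise TypeError("value must be int")
--     if value < 0:
--         raise ValueError("value must be >= 0")
--     maxval = 1 << (7 * length)
--     if value >= maxval:
--         raise OverflowError(f"value {value} not containing in {length} 7bits bytes")
--
--     parts = []
--     for i in range(length):
--         shift = 7 * (length - 1 - i)
--         parts.append((value >> shift) & 0x7F)
--     return " ".join(f"{b:02X}" for b in parts)
-- ===== SOURCE B (Python) =====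
-- def int_to_hexstring(value: int, length: int) -> str:
--     if not isinstance(value, int):
--         raise TypeError("value must be int")
--     if value < 0:
--         raise ValueError("value must be >= 0")
--     maxval = 1 << (7 * length)
--     if value >= maxval:
--         raise OverflowError(f"value {value} not containing in {length} 7bits bytes")
--
--     digits = []
--     v = value
--     while v:
--         digits.append(v & 0x7F)
--         v >>= 7
--     digits.extend([0] * (length - len(digits)))
--     digits.reverse()
--     return " ".join(f"{b:02X}" for b in digits)
-- ===== Notes on version B (the rewrite author's own statement) =====
-- stated objective: alternative
-- what changed: A extracts each byte with a fixed loop over indices computing a per-index shift 7*(length-1-i); B peels base-128 digits least-significant-first with a data-dependent while loop, pads with zeros to the requested length and reverses before formatting.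
import Mathlib
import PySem

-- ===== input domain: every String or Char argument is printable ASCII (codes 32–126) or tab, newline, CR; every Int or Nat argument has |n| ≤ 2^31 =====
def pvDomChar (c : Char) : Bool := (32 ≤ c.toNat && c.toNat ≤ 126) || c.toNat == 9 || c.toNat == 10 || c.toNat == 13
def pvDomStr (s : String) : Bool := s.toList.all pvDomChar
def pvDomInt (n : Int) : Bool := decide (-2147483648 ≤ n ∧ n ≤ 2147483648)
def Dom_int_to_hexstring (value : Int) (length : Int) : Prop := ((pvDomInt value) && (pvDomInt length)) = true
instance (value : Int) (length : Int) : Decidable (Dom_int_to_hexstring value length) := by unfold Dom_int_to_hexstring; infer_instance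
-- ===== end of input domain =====

-- B replaces A's fixed indexed-shift loop by a data-dependent peel of base-128 digits
-- (LSB first) followed by zero padding and a reverse; same cost, different decomposition.

-- shared formatting helper: f"{b:02X}" for 0 ≤ b < 256 (exact there; all bytes are in [0,128))
def pvHexDigit (d : Int) : Char :=
  if d < 10 then Char.ofNat (48 + d.toNat) else Char.ofNat (55 + d.toNat)
def pvHex2 (b : Int) : String :=
  String.ofList [pvHexDigit (PySem.Int.floordiv b 16), pvHexDigit (PySem.Int.mod b 16)]

-- ===== PORT A =====
-- The three guards raise (TypeError/ValueError/OverflowError) exactly outside Pre_;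
-- inside Pre_ the shift 7*(length-1-i) is ≥ 0, so `value >> shift` is floordiv by 2^shift
-- and `& 0x7F` is mod 128 (exact for Python ints).
def int_to_hexstring (value : Int) (length : Int) : String :=
  PySem.Str.join " "
    (((PySem.List.pyRange 0 length 1).foldl
        (fun acc i =>
          acc ++ [PySem.Int.mod (PySem.Int.floordiv value (2 ^ (7 * (length - 1 - i)).toNat)) 128])
        []).map pvHex2)

-- ===== PORT B =====
-- the `while v:` peel loop of Source B; exact for v ≥ 0 (Pre_), terminating on v.toNat
def pvPeel (v : Int) : List Int :=
  if _h : v ≤ 0 then []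
  else PySem.Int.mod v 128 :: pvPeel (PySem.Int.floordiv v 128)
termination_by v.toNat
decreasing_by
  rw [PySem.Int.floordiv_eq_ediv_of_pos (by norm_num)]
  omega

def int_to_hexstring_alt (value : Int) (length : Int) : String :=
  PySem.Str.join " "
    (((pvPeel value
        ++ List.replicate ((length - ((pvPeel value).length : Int)).toNat) 0).reverse).map pvHex2)

-- ===== PRECONDITION & SPEC =====
-- Pre_ excludes exactly the inputs on which A raises: value < 0 (ValueError), length < 0
-- (1 << negative is a ValueError) and value ≥ 2^(7*length) (OverflowError).  The
-- `32 ≤ 7*length` disjunct is equivalent to `value < 2^(7*length)` whenever it fires,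
-- for every value in Dom (value ≤ 2^31 < 2^32 ≤ 2^(7*length)); it only avoids evaluating
-- an astronomically large power — no input on which A returns is excluded.
def Pre_int_to_hexstring (value : Int) (length : Int) : Prop :=
  0 ≤ value ∧ 0 ≤ length ∧ (32 ≤ 7 * length ∨ value < 2 ^ (7 * length).toNat)
instance (value : Int) (length : Int) : Decidable (Pre_int_to_hexstring value length) := by
  unfold Pre_int_to_hexstring; infer_instance

def pvWitness_int_to_hexstring : Int × Int := (300, 3)

def Spec_int_to_hexstring (value : Int) (length : Int) (out : String) : Prop :=
  out = int_to_hexstring_alt value length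
instance (value : Int) (length : Int) (out : String) : Decidable (Spec_int_to_hexstring value length out) := by
  unfold Spec_int_to_hexstring; infer_instance

-- ===== CLAIM (what is proved, stated in full; the proofs are below) =====
def Claim_equal_int_to_hexstring : Prop :=
  ∀ (value : Int) (length : Int), Dom_int_to_hexstring value length →
    Pre_int_to_hexstring value length →
    Spec_int_to_hexstring value length (int_to_hexstring value length)

-- ===== LEMMAS AND PROOFS =====

theorem pv_foldl_append_singleton {α β : Type} (f : α → β) :
    ∀ (l : List α) (acc : List β),
      l.foldl (fun a i => a ++ [f i]) acc = acc ++ l.map f := by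
  intro l
  induction l with
  | nil => simp
  | cons x xs ih => intro acc; simp [List.foldl, ih]

-- the LSB-first digit list: peel + zero padding = the list of n base-128 digits
theorem pv_peel_pad (n : Nat) : ∀ (v : Int), 0 ≤ v → v < 128 ^ n →
    pvPeel v ++ List.replicate (n - (pvPeel v).length) 0
      = (List.range n).map (fun j => PySem.Int.mod (PySem.Int.floordiv v (128 ^ j)) 128) := by
  induction n with
  | zero =>
    intro v h0 hlt
    have hz : v = 0 := by
      have h1 : v < 1 := by simpa using hlt
      omega
    subst hz
    rw [pvPeel]; simp
  | succ n ih =>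
    intro v h0 hlt
    by_cases hv : v ≤ 0
    · have hz : v = 0 := le_antisymm hv h0
      subst hz
      rw [pvPeel]
      simp [PySem.Int.floordiv, PySem.Int.mod]
    · have hvpos : 0 < v := lt_of_not_ge hv
      rw [pvPeel]
      simp only [dif_neg hv]
      have hdvpos : (0:Int) < 128 := by norm_num
      have hfd : PySem.Int.floordiv v 128 = v / 128 :=
        PySem.Int.floordiv_eq_ediv_of_pos hdvpos
      have h0' : 0 ≤ v / 128 := Int.ediv_nonneg h0 (by norm_num)
      have hlt' : v / 128 < 128 ^ n := by
        rw [Int.ediv_lt_iff_lt_mul (by norm_num)]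
        calc v < 128 ^ (n+1) := hlt
        _ = 128 ^ n * 128 := by ring
      have ihv := ih (v / 128) h0' hlt'
      rw [List.range_succ_eq_map]
      simp only [List.map_cons, List.map_map]
      have hhead : PySem.Int.mod (PySem.Int.floordiv v (128 ^ 0)) 128 = PySem.Int.mod v 128 := by
        norm_num [PySem.Int.floordiv_eq_ediv_of_pos (show (0:Int) < 1 by norm_num)]
      have htail : ((List.range n).map
            ((fun j => PySem.Int.mod (PySem.Int.floordiv v (128 ^ j)) 128) ∘ Nat.succ))
          = (List.range n).map
            (fun j => PySem.Int.mod (PySem.Int.floordiv (v / 128) (128 ^ j)) 128) := by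
        apply List.map_congr_left
        intro j _
        simp only [Function.comp]
        congr 1
        rw [PySem.Int.floordiv_eq_ediv_of_pos (by positivity),
            PySem.Int.floordiv_eq_ediv_of_pos (by positivity)]
        rw [pow_succ, mul_comm (128 ^ j : Int) 128]
        exact (Int.ediv_ediv_of_nonneg (show (0:Int) ≤ 128 by norm_num)).symm
      rw [hhead, htail, ← ihv]
      simp [List.length_cons, Nat.succ_sub_succ]

-- ===== VERDICT (by name: the statement is the Claim_ definition above) =====
theorem int_to_hexstring_spec : Claim_equal_int_to_hexstring := by
  intro value length hdom hpre
  obtain ⟨hv0, hl0, hvor⟩ := hpre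
  unfold Spec_int_to_hexstring int_to_hexstring int_to_hexstring_alt
  set n := length.toNat with hn
  -- value < 128 ^ n
  have hvn : value < 128 ^ n := by
    rcases hvor with h5 | hvlt
    · have hn5 : 5 ≤ n := by omega
      have hdv : value ≤ 2147483648 := by
        unfold Dom_int_to_hexstring pvDomInt at hdom
        simp only [Bool.and_eq_true, decide_eq_true_eq] at hdom
        exact hdom.1.2
      calc value ≤ 2147483648 := hdv
        _ < (128:Int) ^ 5 := by norm_num
        _ ≤ 128 ^ n := pow_le_pow_right₀ (by norm_num) hn5
    · have he : (7 * length).toNat = 7 * n := by omega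
      rw [he] at hvlt
      calc value < 2 ^ (7 * n) := hvlt
        _ = (128:Int) ^ n := by rw [pow_mul]; norm_num
  rw [pv_foldl_append_singleton, PySem.List.pyRange_one, List.nil_append]
  have hlen0 : (length - 0).toNat = n := by omega
  rw [hlen0]
  have hrep : ((length - ((pvPeel value).length : Int)).toNat) = n - (pvPeel value).length := by omega
  rw [hrep]
  have hL : List.map (fun i => PySem.Int.mod (PySem.Int.floordiv value (2 ^ (7 * (length - 1 - i)).toNat)) 128)
        (List.map (fun k : Nat => (0:Int) + (k:Int)) (List.range n))
      = (pvPeel value ++ List.replicate (n - (pvPeel value).length) 0).reverse := by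
    rw [List.map_map, pv_peel_pad n value hv0 hvn]
    apply List.ext_getElem
    · simp
    · intro i h1 h2
      simp only [List.getElem_map, List.getElem_reverse, List.length_map, List.length_range,
        List.getElem_range, Function.comp]
      have hi : i < n := by simpa using h1
      congr 2
      have he : (7 * (length - 1 - ((0:Int) + (i:Int)))).toNat = 7 * (n - 1 - i) := by omega
      rw [he, pow_mul]
      norm_num
  rw [hL]
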